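-- pv_equiv track=rewrite | github.com/pypi-data/pypi-mirror-123 | packages/Excelutilities/Excelutilities-0.0.11-py3-none-any.whl/Excelutilities/index_helpers.py | first_and_last_row_index
-- ===== SOURCE A (Python) =====
-- def first_and_last_row_index(address):
--     """
--     Given a user selection of addresses (e.g., "A1:B6,C2:D3") this returns
--     the first and last row which includesa cell from of those addresses
--     """
--     address = address.replace("$","") # removes $ signs in Excel address
--     address_chunks = address.split(",")
--     minimum_index = None
--     maximum_index = None
--     for chunk in address_chunks:
--         if ":" in chunk:
--             first_index, second_index = chunk.split(":")
--         else:
--             first_index = chunk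
--             second_index=chunk
--         first_row_index, last_row_index = (int("".join([x for x in first_index if not x.isalpha()])),int("".join([x for x in second_index if not x.isalpha()])))
--
--         if minimum_index == None or maximum_index == None:
--             minimum_index = first_row_index
--             maximum_index = last_row_index
--         else:
--             minimum_index = min(first_row_index, minimum_index)
--             maximum_index = max(last_row_index, maximum_index)
--
--     return minimum_index, maximum_index
-- ===== SOURCE B (Python) =====
-- def first_and_last_row_index(address):
--     lo = hi = None      # running min of left endpoints / max of right endpoints
--     left = None         # parsed left endpoint of the current chunk, if a ':' was seen
--     buf = []            # non-alphabetic characters of the current endpoint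
--     for ch in address.replace("$", "") + ",":   # sentinel ',' flushes the last chunk
--         if ch == ",":
--             last = int("".join(buf))
--             first = last if left is None else left
--             lo = first if lo is None else min(lo, first)
--             hi = last if hi is None else max(hi, last)
--             left, buf = None, []
--         elif ch == ":":
--             left = int("".join(buf))
--             buf = []
--         elif not ch.isalpha():
--             buf.append(ch)
--     return lo, hi
-- ===== Notes on version B (the rewrite author's own statement) =====
-- stated objective: alternative
-- what changed: Replaces A's staged passes (split on ',', split each chunk on ':', filter-join-int each part, running min/max with None sentinels) by a single character-level state-machine scan of the address that buffers an endpoint's non-alphabetic characters, parses it at ':' and flushes a chunk's (first,last) pair into the running min/max at each ',' (with one sentinel ',').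
import Mathlib
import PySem

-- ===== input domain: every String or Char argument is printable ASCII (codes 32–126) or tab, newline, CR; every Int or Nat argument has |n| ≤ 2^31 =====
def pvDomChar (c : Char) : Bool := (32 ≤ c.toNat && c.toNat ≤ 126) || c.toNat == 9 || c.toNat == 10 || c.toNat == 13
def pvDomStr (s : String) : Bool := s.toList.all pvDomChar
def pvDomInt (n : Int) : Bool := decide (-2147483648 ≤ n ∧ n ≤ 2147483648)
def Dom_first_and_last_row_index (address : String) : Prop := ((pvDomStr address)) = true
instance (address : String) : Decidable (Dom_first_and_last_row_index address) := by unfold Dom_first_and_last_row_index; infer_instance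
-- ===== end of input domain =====

-- B replaces A's split-into-chunks / split-on-colon / filter-join-int passes by a single
-- character-level state-machine scan of the address (with a sentinel ','); objective: alternative.

-- ===== PORT A =====
-- int("".join([x for x in part if not x.isalpha()])); .getD 0 stands where Python raises
-- ValueError (those inputs are outside Pre_).
def pvRowA (part : List Char) : Int :=
  (PySem.Int.ofChars? (part.filter (fun c => !(PySem.Chars.isalpha c)))).getD 0

-- the per-chunk body of A's loop: (first_row_index, last_row_index); when ':' is in the chunk
-- Python unpacks exactly two split parts (more than two raises, outside Pre_) — getD covers that.
def pvChunkA (chunk : List Char) : Int × Int :=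
  if PySem.Chars.isIn [':'] chunk then
    let parts := PySem.Chars.splitOn chunk [':']
    (pvRowA (parts.getD 0 []), pvRowA (parts.getD 1 []))
  else
    (pvRowA chunk, pvRowA chunk)

def pvStepA (st : Option Int × Option Int) (chunk : List Char) : Option Int × Option Int :=
  let fl := pvChunkA chunk
  match st with
  | (none, _) => (some fl.1, some fl.2)
  | (_, none) => (some fl.1, some fl.2)
  | (some mn, some mx) => (some (min fl.1 mn), some (max fl.2 mx))

def first_and_last_row_index (address : String) : Int × Int :=
  let addr := PySem.Chars.replace address.toList ['$'] []
  let chunks := PySem.Chars.splitOn addr [',']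
  let res := chunks.foldl pvStepA (none, none)
  -- chunks is never empty, so both options are some; .getD 0 stands for Python's returned ints
  ((res.1).getD 0, (res.2).getD 0)

-- ===== PORT B =====
-- B's single scan: state = (running (lo, hi), parsed left endpoint of the current chunk if a
-- ':' was seen, buffered non-alphabetic chars of the current endpoint); ',' flushes a chunk.
-- As on the A side, .getD 0 stands where Python's int() raises ValueError (outside Pre_).
def pvScanB (st : Option Int × Option Int) (left : Option Int) (buf : List Char) :
    List Char → Int × Int
  | [] => ((st.1).getD 0, (st.2).getD 0)
  | c :: cs =>
    if c = ',' then
      let last := (PySem.Int.ofChars? buf).getD 0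
      let first := left.getD last
      let lo := match st.1 with | none => first | some m => min m first
      let hi := match st.2 with | none => last | some m => max m last
      pvScanB (some lo, some hi) none [] cs
    else if c = ':' then
      pvScanB st (some ((PySem.Int.ofChars? buf).getD 0)) [] cs
    else if PySem.Chars.isalpha c then
      pvScanB st left buf cs
    else
      pvScanB st left (buf ++ [c]) cs

def first_and_last_row_index_alt (address : String) : Int × Int :=
  pvScanB (none, none) none [] (PySem.Chars.replace address.toList ['$'] [] ++ [','])

-- ===== PRECONDITION & SPEC =====
-- Pre_ excludes exactly the inputs on which Python A raises: a chunk with more than one ':'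
-- (unpacking ValueError) or an endpoint whose non-alpha characters are not a valid int literal.
def Pre_first_and_last_row_index (address : String) : Prop :=
  ∀ chunk ∈ PySem.Chars.splitOn (PySem.Chars.replace address.toList ['$'] []) [','],
    (PySem.Chars.isIn [':'] chunk → (PySem.Chars.splitOn chunk [':']).length = 2) ∧
    ∀ part ∈ (if PySem.Chars.isIn [':'] chunk then PySem.Chars.splitOn chunk [':'] else [chunk]),
      (PySem.Int.ofChars? (part.filter (fun c => !(PySem.Chars.isalpha c)))).isSome = true

instance (address : String) : Decidable (Pre_first_and_last_row_index address) := by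
  unfold Pre_first_and_last_row_index; infer_instance

def pvWitness_first_and_last_row_index : String := "$A$1:B6,C2:D3"

def Spec_first_and_last_row_index (address : String) (out : Int × Int) : Prop := out = first_and_last_row_index_alt address
instance (address : String) (out : Int × Int) : Decidable (Spec_first_and_last_row_index address out) := by unfold Spec_first_and_last_row_index; infer_instance

-- ===== CLAIM (what is proved, stated in full; the proofs are below) =====
def Claim_equal_first_and_last_row_index : Prop := ∀ (address : String), Dom_first_and_last_row_index address → Pre_first_and_last_row_index address → Spec_first_and_last_row_index address (first_and_last_row_index address)

-- ===== LEMMAS AND PROOFS =====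

-- simple structural model of splitting on a single separator character
def pvSplit (sep : Char) (cur : List Char) : List Char → List (List Char)
  | [] => [cur]
  | c :: cs => if c = sep then cur :: pvSplit sep [] cs else pvSplit sep (cur ++ [c]) cs

theorem pv_go_eq (sep : Char) (fuel : Nat) :
    ∀ (l cur : List Char) (accs : List (List Char)), l.length ≤ fuel →
      PySem.Chars.splitOn.go [sep] fuel l cur accs = accs.reverse ++ pvSplit sep cur.reverse l := by
  induction fuel with
  | zero =>
      intro l cur accs h
      have : l = [] := List.length_eq_zero_iff.mp (Nat.le_zero.mp h)
      subst this
      simp [PySem.Chars.splitOn.go, pvSplit]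
  | succ f ih =>
      intro l cur accs h
      cases l with
      | nil => simp [PySem.Chars.splitOn.go, pvSplit]
      | cons c cs =>
          by_cases hc : c = sep
          · subst hc
            have hpre : [c].isPrefixOf (c :: cs) = true := by simp [List.isPrefixOf]
            simp only [PySem.Chars.splitOn.go, hpre, if_true, List.length_cons, List.drop_succ_cons,
              List.length_nil, List.drop_zero]
            rw [ih cs [] ((cur.reverse) :: accs) (by simpa using Nat.le_of_succ_le_succ h)]
            simp [pvSplit]
          · have hpre : [sep].isPrefixOf (c :: cs) = false := by
              simp [List.isPrefixOf]
              exact fun hs => absurd hs.symm hc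
            simp only [PySem.Chars.splitOn.go, hpre, Bool.false_eq_true, if_false]
            rw [ih cs (c :: cur) accs (by simpa using Nat.le_of_succ_le_succ h)]
            simp [pvSplit, hc]

theorem pv_splitOn_eq (sep : Char) (s : List Char) :
    PySem.Chars.splitOn s [sep] = pvSplit sep [] s := by
  unfold PySem.Chars.splitOn
  rw [pv_go_eq sep (s.length + 1) s [] [] (Nat.le_succ _)]
  rfl

theorem pvSplit_length (sep : Char) : ∀ (l cur : List Char),
    (pvSplit sep cur l).length = l.count sep + 1 := by
  intro l
  induction l with
  | nil => intro cur; simp [pvSplit]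
  | cons c cs ih =>
      intro cur
      by_cases hc : c = sep
      · subst hc; simp [pvSplit, ih]
      · simp [pvSplit, hc, ih]

theorem pvSplit_append_no_sep (sep : Char) :
    ∀ (p cur rest : List Char), sep ∉ p →
      pvSplit sep cur (p ++ rest) = pvSplit sep (cur ++ p) rest := by
  intro p
  induction p with
  | nil => intro cur rest _; simp
  | cons c cs ih =>
      intro cur rest hp
      have hc : ¬ c = sep := fun h => hp (by simp [h])
      simp only [List.cons_append, pvSplit, hc, if_false]
      rw [ih (cur ++ [c]) rest (fun h => hp (by simp [h]))]
      simp

theorem pvSplit_single (sep : Char) (q : List Char) (hq : sep ∉ q) :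
    pvSplit sep [] q = [q] := by
  have h := pvSplit_append_no_sep sep q [] [] hq
  simpa [pvSplit] using h

theorem pvSplit_two (sep : Char) (p q : List Char) (hp : sep ∉ p) (hq : sep ∉ q) :
    pvSplit sep [] (p ++ sep :: q) = [p, q] := by
  rw [pvSplit_append_no_sep sep p [] (sep :: q) hp]
  simp only [List.nil_append, pvSplit, if_true]
  rw [pvSplit_single sep q hq]

theorem pv_first_occ {c : Char} : ∀ {l : List Char}, c ∈ l →
    ∃ p q, l = p ++ c :: q ∧ c ∉ p := by
  intro l
  induction l with
  | nil => intro h; cases h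
  | cons a as ih =>
      intro h
      by_cases ha : a = c
      · exact ⟨[], as, by simp [ha], by simp⟩
      · have : c ∈ as := by
          cases List.mem_cons.mp h with
          | inl h' => exact absurd h'.symm ha
          | inr h' => exact h'
        obtain ⟨p, q, hl, hp⟩ := ih this
        exact ⟨a :: p, q, by simp [hl], by
          intro hmem
          cases List.mem_cons.mp hmem with
          | inl h' => exact ha h'.symm
          | inr h' => exact hp h'⟩

theorem pv_isIn_singleton (c : Char) (s : List Char) :
    PySem.Chars.isIn [c] s = (c ∈ s : Bool) := by
  by_cases h : c ∈ s
  · have : PySem.Chars.isIn [c] s = true := by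
      rw [PySem.Chars.isIn_iff_infix]
      exact (List.singleton_infix_iff c s).mpr h
    simp [h, this]
  · have : PySem.Chars.isIn [c] s = false := by
      rw [PySem.Chars.isIn_eq_false_iff]
      exact fun hi => h ((List.singleton_infix_iff c s).mp hi)
    simp [h, this]

-- per-endpoint parsing state of B's scan, and the chunk pair it flushes to
def pvStepPart (st : Option Int × List Char) (c : Char) : Option Int × List Char :=
  if c = ':' then (some ((PySem.Int.ofChars? st.2).getD 0), [])
  else if PySem.Chars.isalpha c then st
  else (st.1, st.2 ++ [c])

def pvPair (left : Option Int) (buf : List Char) : Int × Int :=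
  (left.getD ((PySem.Int.ofChars? buf).getD 0), (PySem.Int.ofChars? buf).getD 0)

theorem pv_foldl_part_no_colon : ∀ (q : List Char), ':' ∉ q → ∀ (l : Option Int) (b : List Char),
    List.foldl pvStepPart (l, b) q = (l, b ++ q.filter (fun c => !(PySem.Chars.isalpha c))) := by
  intro q
  induction q with
  | nil => intro _ l b; simp
  | cons c cs ih =>
      intro hq l b
      have hc : ¬ c = ':' := fun h => hq (by simp [h])
      have hcs : ':' ∉ cs := fun h => hq (by simp [h])
      by_cases ha : PySem.Chars.isalpha c
      · simp [pvStepPart, hc, ha, List.foldl_cons, ih hcs]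
      · simp only [List.foldl_cons, pvStepPart, hc, if_false, ha, Bool.false_eq_true]
        rw [ih hcs]
        simp [ha]

theorem pv_chunk_eq (chunk : List Char) (hcnt : chunk.count ':' ≤ 1) :
    pvPair (List.foldl pvStepPart (none, []) chunk).1
           (List.foldl pvStepPart (none, []) chunk).2 = pvChunkA chunk := by
  by_cases hmem : ':' ∈ chunk
  · obtain ⟨p, q, hl, hp⟩ := pv_first_occ hmem
    have hq : ':' ∉ q := by
      intro hqq
      have : 2 ≤ chunk.count ':' := by
        subst hl
        have h1 : 1 ≤ List.count ':' q := List.one_le_count_iff.mpr hqq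
        simp [List.count_append, List.count_eq_zero_of_not_mem hp]
        omega
      omega
    subst hl
    rw [List.foldl_append, pv_foldl_part_no_colon p hp]
    simp only [List.foldl_cons, pvStepPart, if_true]
    rw [pv_foldl_part_no_colon q hq]
    have hin : PySem.Chars.isIn [':'] (p ++ ':' :: q) = true := by
      rw [pv_isIn_singleton]; simp
    simp only [pvChunkA, hin, if_true, pv_splitOn_eq, pvSplit_two ':' p q hp hq]
    simp [pvPair, pvRowA]
  · rw [pv_foldl_part_no_colon chunk hmem]
    have hin : PySem.Chars.isIn [':'] chunk = false := by
      rw [pv_isIn_singleton]; simp [hmem]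
    simp [pvChunkA, hin, pvPair, pvRowA]

-- chunk pairs produced by B's scan from a mid-chunk state
def pvChunks (left : Option Int) (buf : List Char) : List Char → List (Int × Int)
  | [] => [pvPair left buf]
  | c :: cs =>
    if c = ',' then pvPair left buf :: pvChunks none [] cs
    else pvChunks (pvStepPart (left, buf) c).1 (pvStepPart (left, buf) c).2 cs

def pvUpdB (st : Option Int × Option Int) (p : Int × Int) : Option Int × Option Int :=
  (some (match st.1 with | none => p.1 | some m => min m p.1),
   some (match st.2 with | none => p.2 | some m => max m p.2))

theorem pv_scan_eq : ∀ (cs : List Char) (st : Option Int × Option Int)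
    (left : Option Int) (buf : List Char),
    pvScanB st left buf (cs ++ [',']) =
      ((List.foldl pvUpdB st (pvChunks left buf cs)).1.getD 0,
       (List.foldl pvUpdB st (pvChunks left buf cs)).2.getD 0) := by
  intro cs
  induction cs with
  | nil =>
      intro st left buf
      simp [pvScanB, pvChunks, pvUpdB, pvPair]
  | cons c cs ih =>
      intro st left buf
      by_cases hc : c = ','
      · subst hc
        have h1 : pvScanB st left buf ((',' :: cs) ++ [',']) =
            pvScanB (pvUpdB st (pvPair left buf)) none [] (cs ++ [',']) := by
          simp [pvScanB, pvUpdB, pvPair]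
        have h2 : pvChunks left buf (',' :: cs) = pvPair left buf :: pvChunks none [] cs := by
          simp [pvChunks]
        rw [h1, ih, h2, List.foldl_cons]
      · by_cases hcol : c = ':'
        · subst hcol
          have h1 : pvScanB st left buf ((':' :: cs) ++ [',']) =
              pvScanB st (some ((PySem.Int.ofChars? buf).getD 0)) [] (cs ++ [',']) := by
            simp [pvScanB]
          have h2 : pvChunks left buf (':' :: cs) =
              pvChunks (some ((PySem.Int.ofChars? buf).getD 0)) [] cs := by
            simp [pvChunks, pvStepPart]
          rw [h1, h2, ih]
        · by_cases ha : PySem.Chars.isalpha c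
          · have h1 : pvScanB st left buf ((c :: cs) ++ [',']) =
                pvScanB st left buf (cs ++ [',']) := by
              simp [pvScanB, hc, hcol, ha]
            have h2 : pvChunks left buf (c :: cs) = pvChunks left buf cs := by
              simp [pvChunks, pvStepPart, hc, hcol, ha]
            rw [h1, h2, ih]
          · have h1 : pvScanB st left buf ((c :: cs) ++ [',']) =
                pvScanB st left (buf ++ [c]) (cs ++ [',']) := by
              simp [pvScanB, hc, hcol, ha]
            have h2 : pvChunks left buf (c :: cs) = pvChunks left (buf ++ [c]) cs := by
              simp [pvChunks, pvStepPart, hc, hcol, ha]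
            rw [h1, h2, ih]

theorem pv_fold_eq : ∀ (chunks : List (List Char)) (st : Option Int × Option Int),
    ((st.1 = none) ↔ (st.2 = none)) →
    List.foldl pvUpdB st (chunks.map pvChunkA) = List.foldl pvStepA st chunks := by
  intro chunks
  induction chunks with
  | nil => intro st _; rfl
  | cons c cs ih =>
      intro st hst
      simp only [List.map_cons, List.foldl_cons]
      have hstep : pvUpdB st (pvChunkA c) = pvStepA st c := by
        obtain ⟨a, b⟩ := st
        cases a with
        | none =>
            have hb : b = none := hst.mp rfl
            subst hb; rfl
        | some x =>
            cases b with
            | none => exact absurd (hst.mpr rfl) (by simp)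
            | some y =>
                simp [pvUpdB, pvStepA, min_comm, max_comm]
      rw [hstep]
      apply ih
      obtain ⟨a, b⟩ := st
      cases a <;> cases b <;> simp [pvStepA]

theorem pv_chunks_eq : ∀ (cs p : List Char) (left : Option Int) (buf : List Char),
    List.foldl pvStepPart (none, []) p = (left, buf) → ',' ∉ p →
    (∀ chunk ∈ pvSplit ',' p cs, chunk.count ':' ≤ 1) →
    pvChunks left buf cs = (pvSplit ',' p cs).map pvChunkA := by
  intro cs
  induction cs with
  | nil =>
      intro p left buf hfold _ hgood
      have := pv_chunk_eq p (hgood p (by simp [pvSplit]))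
      rw [hfold] at this
      simp [pvChunks, pvSplit, this]
  | cons c cs ih =>
      intro p left buf hfold hp hgood
      by_cases hc : c = ','
      · subst hc
        have hunf : pvSplit ',' p (',' :: cs) = p :: pvSplit ',' [] cs := by simp [pvSplit]
        have hhead := pv_chunk_eq p (hgood p (by rw [hunf]; exact List.mem_cons_self ..))
        rw [hfold] at hhead
        have h2 : pvChunks left buf (',' :: cs) = pvPair left buf :: pvChunks none [] cs := by
          simp [pvChunks]
        rw [h2, hunf, List.map_cons, hhead, ih [] none [] rfl (by simp)
          (fun chunk hm => hgood chunk (by rw [hunf]; exact List.mem_cons_of_mem _ hm))]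
      · simp only [pvChunks, hc, if_false]
        have hstep : List.foldl pvStepPart (none, []) (p ++ [c]) =
            ((pvStepPart (left, buf) c).1, (pvStepPart (left, buf) c).2) := by
          rw [List.foldl_append, hfold]
          simp
        have hsplit : pvSplit ',' p (c :: cs) = pvSplit ',' (p ++ [c]) cs := by
          simp [pvSplit, hc]
        rw [hsplit] at hgood ⊢
        exact ih (p ++ [c]) _ _ hstep
          (by intro h; rcases List.mem_append.mp h with h' | h'
              · exact hp h'
              · exact hc (List.mem_singleton.mp h').symm) hgood

-- ===== VERDICT (by name: the statement is the Claim_ definition above) =====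
theorem first_and_last_row_index_spec : Claim_equal_first_and_last_row_index := by
  intro address _ hpre
  unfold Spec_first_and_last_row_index first_and_last_row_index first_and_last_row_index_alt
  rw [pv_scan_eq]
  have hgood : ∀ chunk ∈ pvSplit ',' [] (PySem.Chars.replace address.toList ['$'] []),
      chunk.count ':' ≤ 1 := by
    intro chunk hm
    rw [← pv_splitOn_eq] at hm
    obtain ⟨h1, _⟩ := hpre chunk hm
    by_cases hmem : ':' ∈ chunk
    · have hin : PySem.Chars.isIn [':'] chunk = true := by
        rw [pv_isIn_singleton]; simp [hmem]
      have := h1 hin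
      rw [pv_splitOn_eq, pvSplit_length] at this
      omega
    · simp [List.count_eq_zero_of_not_mem hmem]
  rw [pv_chunks_eq (PySem.Chars.replace address.toList ['$'] []) [] none [] rfl (by simp) hgood,
      ← pv_splitOn_eq, pv_fold_eq _ (none, none) (by simp)]
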